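-- pv_equiv track=rewrite | github.com/Lowen-Lab/FluSAP | consensus_pull.py | trim_trailing_Ns
-- ===== SOURCE A (Python) =====
-- def trim_trailing_Ns(seq_in):
-- 	first_non_N_site = -1
-- 	last_non_N_site = -1
-- 	for loc in range(0,len(seq_in)):
-- 		if first_non_N_site == -1:
-- 			nt = seq_in[loc]
-- 			if nt == "A" or nt == "T" or nt == "G" or nt == "C":
-- 				first_non_N_site = loc
-- 	for loc in range(len(seq_in)-1,-1,-1):
-- 		if last_non_N_site == -1:
-- 			nt = seq_in[loc]
-- 			if nt == "A" or nt == "T" or nt == "G" or nt == "C":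
-- 				last_non_N_site = loc
-- 	seq_out = seq_in[first_non_N_site:last_non_N_site+1]
-- 	return seq_out
-- ===== SOURCE B (Python) =====
-- def trim_trailing_Ns(seq_in):
-- 	first = -1
-- 	last = -1
-- 	for i, nt in enumerate(seq_in):
-- 		if nt in "ATGC":
-- 			if first == -1:
-- 				first = i
-- 			last = i
-- 	return seq_in[first:last+1]
-- ===== Notes on version B (the rewrite author's own statement) =====
-- stated objective: simpler
-- what changed: Replaces A's two separate latched scans (a forward range loop for the first ACGT index and a full backward range loop for the last) with a single forward pass over enumerate(seq_in) that maintains both the first and the last ACGT index at once.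
import Mathlib
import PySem

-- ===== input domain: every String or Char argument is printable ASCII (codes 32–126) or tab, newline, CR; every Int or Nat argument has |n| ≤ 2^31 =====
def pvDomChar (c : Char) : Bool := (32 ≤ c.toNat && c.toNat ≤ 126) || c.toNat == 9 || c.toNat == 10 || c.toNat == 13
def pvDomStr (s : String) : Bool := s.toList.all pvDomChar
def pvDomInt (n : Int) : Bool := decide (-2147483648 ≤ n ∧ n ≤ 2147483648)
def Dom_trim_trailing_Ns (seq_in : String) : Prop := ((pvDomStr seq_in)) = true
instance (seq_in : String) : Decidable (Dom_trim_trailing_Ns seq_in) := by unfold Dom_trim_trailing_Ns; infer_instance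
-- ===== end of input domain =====

-- B replaces A's two separate scans (forward for the first ACGT index, backward for the last)
-- with a single forward pass over enumerate(seq) maintaining both indices; same O(n) cost, simpler.


-- ===== PORT A =====
-- literal port of A: forward scan latching the first ACGT index, then a backward scan
-- (range(len-1, -1, -1)) latching the last, then the slice seq[first:last+1]
def trim_trailing_Ns (seq_in : String) : String :=
  let cs := seq_in.toList
  let first_non_N_site : Int :=
    (PySem.List.pyRange 0 (PySem.List.len cs) 1).foldl
      (fun first_non_N_site loc =>
        if first_non_N_site = -1 then
          let nt := PySem.List.pyGetD cs loc 'N'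
          if nt = 'A' ∨ nt = 'T' ∨ nt = 'G' ∨ nt = 'C' then loc else first_non_N_site
        else first_non_N_site) (-1)
  let last_non_N_site : Int :=
    (PySem.List.pyRange (PySem.List.len cs - 1) (-1) (-1)).foldl
      (fun last_non_N_site loc =>
        if last_non_N_site = -1 then
          let nt := PySem.List.pyGetD cs loc 'N'
          if nt = 'A' ∨ nt = 'T' ∨ nt = 'G' ∨ nt = 'C' then loc else last_non_N_site
        else last_non_N_site) (-1)
  String.ofList (PySem.List.slice cs (some first_non_N_site) (some (last_non_N_site + 1)))

-- ===== PORT B =====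
-- literal port of B: one fold over enumerate(seq) carrying the pair (first, last);
-- `nt in "ATGC"` for the single char nt is membership in the four characters
def trim_trailing_Ns_alt (seq_in : String) : String :=
  let cs := seq_in.toList
  let fl : Int × Int :=
    (PySem.List.enumerate cs).foldl
      (fun (fl : Int × Int) x =>
        if x.2 ∈ (['A', 'T', 'G', 'C'] : List Char) then
          ((if fl.1 = -1 then x.1 else fl.1), x.1)
        else fl) (-1, -1)
  String.ofList (PySem.List.slice cs (some fl.1) (some (fl.2 + 1)))

-- ===== PRECONDITION & SPEC =====
def Spec_trim_trailing_Ns (seq_in : String) (out : String) : Prop := out = trim_trailing_Ns_alt seq_in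
instance (seq_in : String) (out : String) : Decidable (Spec_trim_trailing_Ns seq_in out) := by unfold Spec_trim_trailing_Ns; infer_instance

-- ===== CLAIM (what is proved, stated in full; the proofs are below) =====
def Claim_equal_trim_trailing_Ns : Prop := ∀ (seq_in : String), Dom_trim_trailing_Ns seq_in → Spec_trim_trailing_Ns seq_in (trim_trailing_Ns seq_in)

-- ===== LEMMAS AND PROOFS =====

-- the first component of B's pair fold is exactly A's first-latch fold
theorem pair_fst (p : Int → Prop) [DecidablePred p] (L : List Int) (f l : Int) :
    (L.foldl (fun fl j => if p j then ((if fl.1 = -1 then j else fl.1), j) else fl) (f, l)).1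
      = L.foldl (fun first j => if first = -1 then (if p j then j else first) else first) f := by
  induction L generalizing f l with
  | nil => rfl
  | cons j L ih =>
      simp only [List.foldl_cons]
      by_cases hp : p j
      · by_cases hf : f = -1 <;> simp [hp, hf, ih]
      · simp [hp, ih]

-- the second component of B's pair fold is an unlatched "keep the last hit" fold
theorem pair_snd (p : Int → Prop) [DecidablePred p] (L : List Int) (f l : Int) :
    (L.foldl (fun fl j => if p j then ((if fl.1 = -1 then j else fl.1), j) else fl) (f, l)).2
      = L.foldl (fun last j => if p j then j else last) l := by
  induction L generalizing f l with
  | nil => rfl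
  | cons j L ih =>
      simp only [List.foldl_cons]
      by_cases hp : p j <;> simp [hp, ih]

-- the unlatched fold either ignores its seed (and yields a member) or returns each seed
theorem plain_cases (p : Int → Prop) [DecidablePred p] (L : List Int) (a b : Int) :
    (L.foldl (fun last j => if p j then j else last) a
        = L.foldl (fun last j => if p j then j else last) b
      ∧ L.foldl (fun last j => if p j then j else last) a ∈ L)
    ∨ (L.foldl (fun last j => if p j then j else last) a = a
      ∧ L.foldl (fun last j => if p j then j else last) b = b) := by
  induction L generalizing a b with
  | nil => exact Or.inr ⟨rfl, rfl⟩
  | cons j L ih =>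
      simp only [List.foldl_cons]
      by_cases hp : p j
      · rw [if_pos hp, if_pos hp]
        rcases ih j j with ⟨he, hm⟩ | ⟨ha, _⟩
        · exact Or.inl ⟨rfl, List.mem_cons_of_mem _ hm⟩
        · exact Or.inl ⟨rfl, by rw [ha]; exact List.mem_cons_self⟩
      · rw [if_neg hp, if_neg hp]
        rcases ih a b with ⟨he, hm⟩ | ⟨ha, hb⟩
        · exact Or.inl ⟨he, List.mem_cons_of_mem _ hm⟩
        · exact Or.inr ⟨ha, hb⟩

-- a latched fold over the REVERSED index list equals the unlatched forward fold
theorem rev_latch (p : Int → Prop) [DecidablePred p] (L : List Int)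
    (hnn : ∀ j ∈ L, 0 ≤ j) :
    L.reverse.foldl (fun last j => if last = -1 then (if p j then j else last) else last) (-1)
      = L.foldl (fun last j => if p j then j else last) (-1) := by
  induction L with
  | nil => rfl
  | cons j L ih =>
      have hnn' : ∀ k ∈ L, 0 ≤ k := fun k hk => hnn k (List.mem_cons_of_mem _ hk)
      have ih' := ih hnn'
      simp only [List.reverse_cons, List.foldl_append, List.foldl_cons, List.foldl_nil, ih']
      by_cases hp : p j
      · rcases plain_cases p L (-1) j with ⟨he, hm⟩ | ⟨ha, hb⟩
        · have h0 : (0 : Int) ≤ L.foldl (fun last j => if p j then j else last) (-1) :=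
            hnn' _ hm
          have hvj : L.foldl (fun last j => if p j then j else last) j ≠ -1 := by
            rw [← he]; omega
          simp [hp, hvj, he]
        · simp [ha, hb, hp]
      · simp [hp]

-- both ports compute the same string on every input
theorem ports_eq (seq_in : String) : trim_trailing_Ns seq_in = trim_trailing_Ns_alt seq_in := by
  unfold trim_trailing_Ns trim_trailing_Ns_alt
  simp only []
  set cs := seq_in.toList with hcs
  -- B's enumerate fold as a fold over the index range
  rw [PySem.List.enumerate_eq_map_pyRange cs 'N', List.foldl_map]
  set p : Int → Prop := fun j =>
    PySem.List.pyGetD cs j 'N' = 'A' ∨ PySem.List.pyGetD cs j 'N' = 'T' ∨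
    PySem.List.pyGetD cs j 'N' = 'G' ∨ PySem.List.pyGetD cs j 'N' = 'C' with hp
  have hBstep :
      (PySem.List.pyRange 0 (PySem.List.len cs) 1).foldl
        (fun (fl : Int × Int) j =>
          if (j, PySem.List.pyGetD cs j 'N').2 ∈ (['A', 'T', 'G', 'C'] : List Char) then
            ((if fl.1 = -1 then (j, PySem.List.pyGetD cs j 'N').1 else fl.1),
              (j, PySem.List.pyGetD cs j 'N').1)
          else fl) (-1, -1)
      = (PySem.List.pyRange 0 (PySem.List.len cs) 1).foldl
        (fun (fl : Int × Int) j => if p j then ((if fl.1 = -1 then j else fl.1), j) else fl)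
        (-1, -1) := by
    apply PySem.List.foldl_congr_mem
    intro acc j _
    by_cases hj : p j
    · rw [if_pos hj, if_pos]
      simp only [hp] at hj
      simpa using hj
    · rw [if_neg hj, if_neg]
      simp only [hp] at hj
      simpa using hj
  rw [hBstep]
  have hrev : PySem.List.pyRange (PySem.List.len cs - 1) (-1) (-1)
      = (PySem.List.pyRange 0 (PySem.List.len cs) 1).reverse := by
    have := PySem.List.pyRange_neg_one_eq_reverse (PySem.List.len cs - 1) (-1)
    simpa using this
  rw [hrev]
  have hnn : ∀ j ∈ PySem.List.pyRange 0 (PySem.List.len cs) 1, (0 : Int) ≤ j := by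
    intro j hj
    have := (PySem.List.mem_pyRange_iff_of_pos (a := 0) (b := PySem.List.len cs)
      (s := 1) (by norm_num) j).mp hj
    exact this.1
  rw [pair_fst p, pair_snd p, rev_latch p _ hnn]

-- ===== VERDICT (by name: the statement is the Claim_ definition above) =====
theorem trim_trailing_Ns_spec : Claim_equal_trim_trailing_Ns := by
  intro seq_in _
  unfold Spec_trim_trailing_Ns
  exact ports_eq seq_in
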